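-- pv_equiv track=rewrite | github.com/KTH-dESA/OSeMOSYS_step | src/main_utils.py | append_step_num_to_option
-- ===== SOURCE A (Python) =====
-- from typing import Dict, List, Tuple, Any
--
-- def append_step_num_to_option(options_per_step: Dict[int, List[str]]) -> Dict[int, List[str]]:
--     """Adds the step number to uniquely identify the option
--
--     Args:
--         options_per_step: Dict[int, List[str]]
--             {1:[A0-B0, A0-B1, A1-B0, A1-B1], 2:[C0, C1]}
--
--     Retuns:
--         Dict[int, List[str]]
--             {1:[1A0-1B0, 1A0-1B1, 1A1-1B0, 1A1-1B1], 2:[2C0, 2C1]}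
--     """
--     output = {}
--     for step, options in options_per_step.items():
--         if not options:
--             output[step] = options
--             continue
--         new_options =[]
--         for option in options:
--             parts = option.split("-")
--             new_parts = []
--             for part in parts:
--                 new_parts.append(f"{step}{part}")
--             new_options.append("-".join(new_parts))
--         output[step] = new_options
--     return output
-- ===== SOURCE B (Python) =====
-- from typing import Dict, List
--
--
-- def _tag(prefix: str, option: str) -> str:
--     """Single left-to-right character scan: emit the prefix, then copy each
--     character, re-emitting the prefix right after every '-'."""
--     buf = [prefix]
--     for ch in option:
--         buf.append(ch)
--         if ch == "-":
--             buf.append(prefix)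
--     return "".join(buf)
--
--
-- def append_step_num_to_option(options_per_step: Dict[int, List[str]]) -> Dict[int, List[str]]:
--     """Adds the step number to uniquely identify the option."""
--     return {step: [_tag(str(step), option) for option in options]
--             for step, options in options_per_step.items()}
-- ===== Notes on version B (the rewrite author's own statement) =====
-- stated objective: alternative
-- what changed: Replaces A's tokenize/rejoin pipeline (split on '-', per-part loop, '-'.join) by a single-pass character-level scan with an accumulator that emits the step prefix at the start and again right after each '-' character, never materialising the parts.
import Mathlib
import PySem

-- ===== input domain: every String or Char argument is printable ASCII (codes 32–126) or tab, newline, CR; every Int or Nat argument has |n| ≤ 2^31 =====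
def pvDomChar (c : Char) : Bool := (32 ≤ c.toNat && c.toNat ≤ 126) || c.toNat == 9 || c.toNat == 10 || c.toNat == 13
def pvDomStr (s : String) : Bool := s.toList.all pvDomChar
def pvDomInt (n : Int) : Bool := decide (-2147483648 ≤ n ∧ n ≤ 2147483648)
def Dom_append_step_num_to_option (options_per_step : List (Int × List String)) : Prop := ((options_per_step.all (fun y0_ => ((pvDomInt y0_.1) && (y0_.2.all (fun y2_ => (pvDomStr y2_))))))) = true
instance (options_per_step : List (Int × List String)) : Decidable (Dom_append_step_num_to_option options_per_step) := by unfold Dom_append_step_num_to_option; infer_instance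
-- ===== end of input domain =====

-- B replaces A's split/part-loop/join pipeline by a one-pass character scan that emits the
-- step prefix at the start and right after each '-' (objective: alternative decomposition).

-- ===== PORT A =====
-- option.split("-"): the separator is the nonempty literal "-", so split? is always `some`; getD [] is never taken.
def append_step_num_to_option (options_per_step : List (Int × List String)) : List (Int × List String) :=
  (options_per_step.foldl
    (fun (output : PySem.Dict Int (List String)) p =>
      let step := p.1
      let options := p.2
      if options = [] then output.insert step options
      else
        let new_options := options.foldl
          (fun new_options option =>
            let parts := (PySem.Str.split? option "-").getD []
            let new_parts := parts.foldl
              (fun new_parts part => new_parts ++ [PySem.Int.toStr step ++ part]) []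
            new_options ++ [PySem.Str.join "-" new_parts]) []
        output.insert step new_options)
    PySem.Dict.empty).items

-- ===== PORT B =====
-- _tag: buf starts as [prefix]; the character loop appends ch, and after a '-' the prefix again;
-- ported at the character level (''.join of the buffer = the concatenated char accumulator).
def pvTag (pfx : String) (option : String) : String :=
  String.ofList
    (option.toList.foldl
      (fun buf ch => buf ++ [ch] ++ (if ch = '-' then pfx.toList else []))
      pfx.toList)

def append_step_num_to_option_alt (options_per_step : List (Int × List String)) : List (Int × List String) :=
  (options_per_step.foldl
    (fun (output : PySem.Dict Int (List String)) p =>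
      output.insert p.1 (p.2.map (fun option => pvTag (PySem.Int.toStr p.1) option)))
    PySem.Dict.empty).items

-- ===== PRECONDITION & SPEC =====
def Spec_append_step_num_to_option (options_per_step : List (Int × List String)) (out : List (Int × List String)) : Prop := out = append_step_num_to_option_alt options_per_step
instance (options_per_step : List (Int × List String)) (out : List (Int × List String)) : Decidable (Spec_append_step_num_to_option options_per_step out) := by unfold Spec_append_step_num_to_option; infer_instance

-- ===== CLAIM (what is proved, stated in full; the proofs are below) =====
def Claim_equal_append_step_num_to_option : Prop := ∀ (options_per_step : List (Int × List String)), Dom_append_step_num_to_option options_per_step → Spec_append_step_num_to_option options_per_step (append_step_num_to_option options_per_step)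

-- ===== LEMMAS AND PROOFS =====

-- Proof-only reference version of split-on-'-' (structural recursion):
def mySplit (pre : List Char) : List Char → List (List Char)
  | [] => [pre]
  | c :: t => if c = '-' then pre :: mySplit [] t else mySplit (pre ++ [c]) t

lemma split_go_eq (l : List Char) : ∀ (fuel : Nat) (cur : List Char) (accs : List (List Char)),
    l.length < fuel →
    PySem.Chars.splitOn.go ['-'] fuel l cur accs = accs.reverse ++ mySplit cur.reverse l := by
  induction l with
  | nil =>
    intro fuel cur accs h
    match fuel, h with
    | fuel+1, _ => simp [PySem.Chars.splitOn.go, mySplit]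
  | cons c t ih =>
    intro fuel cur accs h
    match fuel, h with
    | fuel+1, h =>
      rw [PySem.Chars.splitOn.go]
      by_cases hc : c = '-'
      · subst hc
        simp only [List.isPrefixOf, BEq.rfl, Bool.and_eq_true, if_true, and_self, List.length_cons,
          List.drop_succ_cons, List.length_nil, List.drop_zero]
        rw [ih fuel [] (cur.reverse :: accs) (by simpa using h)]
        simp [mySplit]
      · have : ¬ (['-'].isPrefixOf (c :: t) = true) := by
          simp [List.isPrefixOf]; intro hh; exact hc hh.symm
        rw [if_neg this]
        rw [ih fuel (c :: cur) accs (by simpa using Nat.lt_of_succ_lt_succ h)]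
        simp [mySplit, hc]

-- Proof-only reference version of the char-scan body of pvTag:
def myRep (ts : List Char) : List Char → List Char
  | [] => []
  | c :: t => if c = '-' then '-' :: (ts ++ myRep ts t) else c :: myRep ts t

lemma tag_fold_eq (ts : List Char) (l : List Char) : ∀ (acc : List Char),
    l.foldl (fun buf ch => buf ++ [ch] ++ (if ch = '-' then ts else [])) acc
      = acc ++ myRep ts l := by
  induction l with
  | nil => intro acc; simp [myRep]
  | cons c t ih =>
    intro acc
    by_cases hc : c = '-'
    · subst hc
      simp only [List.foldl_cons, if_true, myRep]
      rw [ih]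
      simp
    · simp only [List.foldl_cons, hc, if_false, myRep]
      rw [ih]
      simp [hc]

lemma mySplit_ne_nil (l : List Char) : ∀ pre, mySplit pre l ≠ [] := by
  induction l with
  | nil => intro pre; simp [mySplit]
  | cons c t ih =>
    intro pre
    by_cases hc : c = '-' <;> simp [mySplit, hc, ih]

lemma join_mySplit (ts : List Char) (l : List Char) : ∀ (pre : List Char),
    PySem.Chars.join ['-'] ((mySplit pre l).map (fun p => ts ++ p)) = ts ++ pre ++ myRep ts l := by
  induction l with
  | nil => intro pre; simp [mySplit, myRep, PySem.Chars.join_singleton]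
  | cons c t ih =>
    intro pre
    by_cases hc : c = '-'
    · subst hc
      simp only [mySplit, if_true, List.map_cons, myRep]
      obtain ⟨h0, tl0, hsp⟩ : ∃ h0 tl0, mySplit ([] : List Char) t = h0 :: tl0 := by
        cases hm : mySplit ([] : List Char) t with
        | nil => exact absurd hm (mySplit_ne_nil t [])
        | cons a b => exact ⟨a, b, rfl⟩
      rw [hsp]
      simp only [List.map_cons]
      rw [PySem.Chars.join_cons_cons]
      have := ih []
      rw [hsp] at this
      simp only [List.map_cons] at this
      rw [this]
      simp
    · simp only [mySplit, hc, if_false, myRep]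
      rw [ih (pre ++ [c])]
      simp

lemma splitOn_eq_mySplit (s : List Char) :
    PySem.Chars.splitOn s ['-'] = mySplit [] s := by
  rw [PySem.Chars.splitOn]
  rw [split_go_eq s (s.length + 1) [] [] (by omega)]
  simp

lemma option_closed_form (step : Int) (s : String) :
    PySem.Str.join "-"
      (((PySem.Str.split? s "-").getD []).map (fun part => PySem.Int.toStr step ++ part)) =
    pvTag (PySem.Int.toStr step) s := by
  apply String.toList_inj.mp
  rw [pvTag, String.toList_ofList, tag_fold_eq, PySem.Int.toList_toStr]
  rw [PySem.Str.join, PySem.Str.split?, PySem.Chars.split?]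
  simp only [String.toList_ofList]
  have hsep : ("-" : String).toList = ['-'] := rfl
  rw [hsep]
  simp only [List.isEmpty_cons, if_false, Bool.false_eq_true, Option.map_some, Option.getD_some]
  rw [splitOn_eq_mySplit]
  rw [List.map_map, List.map_map]
  have hmapeq : ((String.toList ∘ fun part => PySem.Int.toStr step ++ part) ∘ String.ofList)
      = fun p => PySem.Int.toChars step ++ p := by
    funext p
    simp [String.toList_append, PySem.Int.toList_toStr]
  rw [hmapeq]
  have := join_mySplit (PySem.Int.toChars step) s.toList []
  simpa using this

-- ===== VERDICT (by name: the statement is the Claim_ definition above) =====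
theorem append_step_num_to_option_spec : Claim_equal_append_step_num_to_option := by
  intro l _
  show append_step_num_to_option l = append_step_num_to_option_alt l
  unfold append_step_num_to_option append_step_num_to_option_alt
  congr 1
  apply PySem.List.foldl_congr_mem
  intro output p _
  by_cases hp : p.2 = []
  · simp [hp]
  · simp only [if_neg hp]
    congr 1
    rw [PySem.List.foldl_append_singleton_eq_map
      (fun option => PySem.Str.join "-"
        ((((PySem.Str.split? option "-").getD []).foldl
          (fun new_parts part => new_parts ++ [PySem.Int.toStr p.1 ++ part]) []))) p.2 []]
    simp only [List.nil_append]
    apply List.map_congr_left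
    intro option _
    rw [PySem.List.foldl_append_singleton_eq_map (fun part => PySem.Int.toStr p.1 ++ part)]
    simp only [List.nil_append]
    exact option_closed_form p.1 option
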